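-- pv_equiv track=rewrite | github.com/AnaBeatriizOliveira/C-digos-FPC1 | batalha naval 2.py | destruir_navios
-- ===== SOURCE A (Python) =====
-- def encontrar_navio(T, i, j, n, m):
--     if i < 0 or i >= n or j < 0 or j >= m:
--         return
--     if T[i][j] != '#':
--         return
--     T[i][j] = '.'
--     encontrar_navio(T, i, j + 1, n, m)
--     encontrar_navio(T, i, j - 1, n, m)
--     encontrar_navio(T, i + 1, j, n, m)
--     encontrar_navio(T, i - 1, j, n, m)
--
-- def destruir_navios(T, disparos):
--     n, m = len(T), len(T[0])
--     navios_destruidos = 0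
--
--     for disparo in disparos:
--         l, c = disparo
--         if T[l-1][c-1] == '#':
--             navios_destruidos += 1
--             encontrar_navio(T, l-1, c-1, n, m)
--         T[l-1][c-1] = '.'
--
--     return navios_destruidos
-- ===== SOURCE B (Python) =====
-- def destruir_navios(T, disparos):
--     n, m = len(T), len(T[0])
--     destroyed = 0
--     for l, c in disparos:
--         if T[l-1][c-1] == '#':
--             destroyed += 1
--             stack = [(l - 1, c - 1)]
--             while stack:
--                 i, j = stack.pop()
--                 if i < 0 or i >= n or j < 0 or j >= m:
--                     continue
--                 if T[i][j] != '#':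
--                     continue
--                 T[i][j] = '.'
--                 stack.append((i - 1, j))
--                 stack.append((i + 1, j))
--                 stack.append((i, j - 1))
--                 stack.append((i, j + 1))
--         T[l-1][c-1] = '.'
--     return destroyed
-- ===== Notes on version B (the rewrite author's own statement) =====
-- stated objective: idiomatic
-- what changed: The recursive flood fill is replaced by an iterative one with an explicit stack (seed the shot cell, pop, bounds/'#' check, erase, push the four neighbours), avoiding Python recursion-depth limits; the outer loop and counting are kept.
-- outside the precondition, e.g. on destruir_navios([['#'], ['#', '#']], []): A returns 0, B returns 0
import Mathlib
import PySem

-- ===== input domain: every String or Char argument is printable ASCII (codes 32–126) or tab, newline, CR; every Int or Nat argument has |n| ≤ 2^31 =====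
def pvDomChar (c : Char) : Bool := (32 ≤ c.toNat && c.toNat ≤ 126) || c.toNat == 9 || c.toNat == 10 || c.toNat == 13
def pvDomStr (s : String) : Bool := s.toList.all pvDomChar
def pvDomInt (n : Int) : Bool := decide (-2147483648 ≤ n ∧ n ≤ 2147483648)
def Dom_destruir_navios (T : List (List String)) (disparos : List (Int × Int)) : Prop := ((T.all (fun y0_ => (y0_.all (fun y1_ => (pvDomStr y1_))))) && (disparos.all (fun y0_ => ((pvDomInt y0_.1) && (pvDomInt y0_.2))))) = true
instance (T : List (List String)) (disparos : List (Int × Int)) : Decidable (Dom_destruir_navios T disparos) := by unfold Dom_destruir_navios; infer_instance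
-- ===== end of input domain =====

-- B replaces the recursive flood fill by an iterative explicit-stack one; the outer loop is kept.
-- Both Pythons mutate T in place identically; the equivalence proved here is about the RETURN value.

-- ===== PORT A =====
-- shared grid primitives (exact under Pre_: indices produced by the guarded flood fill are in range,
-- and the outer shot indices obey Python's negative-index wraparound, mirrored by pyWrapIdx)
def getCellN (g : List (List String)) (a b : Nat) : String := (g.getD a []).getD b ""

def pySetCell (g : List (List String)) (a b : Nat) (v : String) : List (List String) :=
  g.set a ((g.getD a []).set b v)

def pyWrapIdx (len : Nat) (i : Int) : Nat := (if i < 0 then i + len else i).toNat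

def pyGet2 (g : List (List String)) (i j : Int) : String :=
  PySem.List.pyGetD (PySem.List.pyGetD g i []) j ""

def pySet2 (g : List (List String)) (i j : Int) (v : String) : List (List String) :=
  let a := pyWrapIdx g.length i
  pySetCell g a (pyWrapIdx (g.getD a []).length j) v

-- A's recursion is not structurally decreasing; fuel only makes it total (never exhausted under Pre_,
-- where the caller's fuel n*m+1 exceeds the number of '#' cells)
def encontrar_navioF : Nat → List (List String) → Int → Int → Int → Int → List (List String)
  | 0, g, _, _, _, _ => g
  | f+1, g, i, j, n, m =>
    if i < 0 ∨ n ≤ i ∨ j < 0 ∨ m ≤ j then g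
    else if getCellN g i.toNat j.toNat ≠ "#" then g
    else
      let g1 := pySetCell g i.toNat j.toNat "."
      let g2 := encontrar_navioF f g1 i (j+1) n m
      let g3 := encontrar_navioF f g2 i (j-1) n m
      let g4 := encontrar_navioF f g3 (i+1) j n m
      encontrar_navioF f g4 (i-1) j n m

def destruir_navios (T : List (List String)) (disparos : List (Int × Int)) : Int :=
  let n : Int := T.length
  let m : Int := (T.headD []).length
  let fuel : Nat := T.length * (T.headD []).length + 1
  (disparos.foldl (fun (st : List (List String) × Int) d =>
    if pyGet2 st.1 (d.1 - 1) (d.2 - 1) == "#" then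
      (pySet2 (encontrar_navioF fuel st.1 (d.1 - 1) (d.2 - 1) n m) (d.1 - 1) (d.2 - 1) ".", st.2 + 1)
    else (pySet2 st.1 (d.1 - 1) (d.2 - 1) ".", st.2)) (T, 0)).2

-- ===== PORT B =====
def pvCount : List (List String) → Nat
  | [] => 0
  | r :: t => r.countP (fun s => s == "#") + pvCount t

-- termination measure facts for the stack loop (cited in decreasing_by)
theorem countP_set_str_lt (r : List String) (b : Nat) (h : r.getD b "" = "#") :
    (r.set b ".").countP (fun s => s == "#") < r.countP (fun s => s == "#") := by
  induction r generalizing b with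
  | nil => simp [List.getD] at h
  | cons x t ih =>
    cases b with
    | zero =>
      simp [List.getD] at h
      simp [h]
    | succ b =>
      have h' : t.getD b "" = "#" := by simpa [List.getD] using h
      have := ih b h'
      simp [List.countP_cons]
      omega

theorem pvCount_pySetCell_lt (g : List (List String)) (a b : Nat)
    (h : getCellN g a b = "#") : pvCount (pySetCell g a b ".") < pvCount g := by
  induction g generalizing a with
  | nil => simp [getCellN, List.getD] at h
  | cons r t ih =>
    cases a with
    | zero =>
      have h' : r.getD b "" = "#" := by simpa [getCellN, List.getD] using h
      have := countP_set_str_lt r b h'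
      simp [pySetCell, pvCount, List.getD]
      omega
    | succ a =>
      have h' : getCellN t a b = "#" := by simpa [getCellN, List.getD] using h
      have := ih a h'
      simp [pySetCell, pvCount, List.getD] at this ⊢
      simpa [pySetCell] using this

def floodStack : List (List String) → List (Int × Int) → Int → Int → List (List String)
  | g, [], _, _ => g
  | g, (i, j) :: s, n, m =>
    if i < 0 ∨ n ≤ i ∨ j < 0 ∨ m ≤ j then floodStack g s n m
    else if getCellN g i.toNat j.toNat ≠ "#" then floodStack g s n m
    else floodStack (pySetCell g i.toNat j.toNat ".")
      ((i, j+1) :: (i, j-1) :: (i+1, j) :: (i-1, j) :: s) n m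
termination_by g s _ _ => 4 * pvCount g + s.length
decreasing_by
  · simp
  · simp
  · have := pvCount_pySetCell_lt g i.toNat j.toNat (by simpa using ‹¬ getCellN g i.toNat j.toNat ≠ "#"›)
    simp only [List.length_cons]
    omega

def destruir_loop (g : List (List String)) (ds : List (Int × Int)) (k : Int) (n m : Int) : Int :=
  match ds with
  | [] => k
  | (l, c) :: rest =>
    if pyGet2 g (l - 1) (c - 1) == "#" then
      destruir_loop (pySet2 (floodStack g [(l - 1, c - 1)] n m) (l - 1) (c - 1) ".") rest (k + 1) n m
    else
      destruir_loop (pySet2 g (l - 1) (c - 1) ".") rest k n m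

def destruir_navios_alt (T : List (List String)) (disparos : List (Int × Int)) : Int :=
  destruir_loop T disparos 0 (T.length : Int) ((T.headD []).length : Int)

-- ===== PRECONDITION & SPEC =====
-- Pre_ excludes inputs on which A may raise IndexError: empty T (T[0]), shots outside Python's
-- negative-index range, and ragged grids (rows not all of length len(T[0])), on which the flood fill
-- raises iff it reaches a short row — not expressible in closed form, so all ragged grids are excluded
-- even though A returns on some of them (e.g. when disparos is empty).
def Pre_destruir_navios (T : List (List String)) (disparos : List (Int × Int)) : Prop :=
  T ≠ [] ∧ (∀ r ∈ T, r.length = (T.headD []).length) ∧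
  ∀ p ∈ disparos,
    (-(T.length : Int) ≤ p.1 - 1 ∧ p.1 - 1 < (T.length : Int)) ∧
    (-((T.headD []).length : Int) ≤ p.2 - 1 ∧ p.2 - 1 < ((T.headD []).length : Int))
instance (T : List (List String)) (disparos : List (Int × Int)) : Decidable (Pre_destruir_navios T disparos) := by unfold Pre_destruir_navios; infer_instance

def pvWitness_destruir_navios : List (List String) × (List (Int × Int)) :=
  ([["#", "#", "."], [".", "#", "."], [".", ".", "#"]], [(1, 1), (3, 3), (2, 2)])

def Spec_destruir_navios (T : List (List String)) (disparos : List (Int × Int)) (out : Int) : Prop := out = destruir_navios_alt T disparos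
instance (T : List (List String)) (disparos : List (Int × Int)) (out : Int) : Decidable (Spec_destruir_navios T disparos out) := by unfold Spec_destruir_navios; infer_instance

-- ===== CLAIM (what is proved, stated in full; the proofs are below) =====
def Claim_equal_destruir_navios : Prop := ∀ (T : List (List String)) (disparos : List (Int × Int)), Dom_destruir_navios T disparos → Pre_destruir_navios T disparos → Spec_destruir_navios T disparos (destruir_navios T disparos)

-- ===== LEMMAS AND PROOFS =====

theorem countP_set_str_le (r : List String) (b : Nat) :
    (r.set b ".").countP (fun s => s == "#") ≤ r.countP (fun s => s == "#") := by
  induction r generalizing b with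
  | nil => simp
  | cons x t ih =>
    cases b with
    | zero => simp [List.countP_cons]
    | succ b => have := ih b; simp [List.countP_cons]; omega

theorem pvCount_pySetCell_le (g : List (List String)) (a b : Nat) :
    pvCount (pySetCell g a b ".") ≤ pvCount g := by
  induction g generalizing a with
  | nil => simp [pySetCell, pvCount]
  | cons r t ih =>
    cases a with
    | zero =>
      have := countP_set_str_le r b
      simp only [pySetCell, pvCount, List.getD, List.set_cons_zero, List.getElem?_cons_zero, Option.getD_some]
      omega
    | succ a =>
      have := ih a
      simp only [pySetCell, pvCount, List.getD, List.set_cons_succ, List.getElem?_cons_succ] at this ⊢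
      omega

theorem pvCount_pySet2_le (g : List (List String)) (i j : Int) :
    pvCount (pySet2 g i j ".") ≤ pvCount g := by
  simpa [pySet2] using pvCount_pySetCell_le g (pyWrapIdx g.length i) (pyWrapIdx (g.getD (pyWrapIdx g.length i) []).length j)

theorem pvCount_encF_le (f : Nat) : ∀ (g : List (List String)) (i j n m : Int),
    pvCount (encontrar_navioF f g i j n m) ≤ pvCount g := by
  induction f with
  | zero => intro g i j n m; simp [encontrar_navioF]
  | succ f ih =>
    intro g i j n m
    rw [encontrar_navioF]
    split
    · exact le_rfl
    · split
      · exact le_rfl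
      · rename_i hb hc
        have h1 : getCellN g i.toNat j.toNat = "#" := by simpa using hc
        have hset := pvCount_pySetCell_lt g i.toNat j.toNat h1
        calc pvCount (encontrar_navioF f (encontrar_navioF f (encontrar_navioF f (encontrar_navioF f (pySetCell g i.toNat j.toNat ".") i (j+1) n m) i (j-1) n m) (i+1) j n m) (i-1) j n m)
            ≤ pvCount (encontrar_navioF f (encontrar_navioF f (encontrar_navioF f (pySetCell g i.toNat j.toNat ".") i (j+1) n m) i (j-1) n m) (i+1) j n m) := ih _ _ _ _ _
          _ ≤ pvCount (encontrar_navioF f (encontrar_navioF f (pySetCell g i.toNat j.toNat ".") i (j+1) n m) i (j-1) n m) := ih _ _ _ _ _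
          _ ≤ pvCount (encontrar_navioF f (pySetCell g i.toNat j.toNat ".") i (j+1) n m) := ih _ _ _ _ _
          _ ≤ pvCount (pySetCell g i.toNat j.toNat ".") := ih _ _ _ _ _
          _ ≤ pvCount g := le_of_lt hset

-- the defunctionalization lemma: the explicit stack processes (i,j) exactly as A's recursion does
theorem flood_eq (cnt : Nat) : ∀ (g : List (List String)) (i j n m : Int) (s : List (Int × Int)) (f : Nat),
    pvCount g ≤ cnt → pvCount g < f →
    floodStack g ((i, j) :: s) n m = floodStack (encontrar_navioF f g i j n m) s n m := by
  induction cnt with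
  | zero =>
    intro g i j n m s f hle hf
    obtain ⟨f', rfl⟩ : ∃ f', f = f' + 1 := ⟨f - 1, by omega⟩
    rw [floodStack, encontrar_navioF]
    split
    · rfl
    · split
      · rfl
      · rename_i hb hc
        have h1 : getCellN g i.toNat j.toNat = "#" := by simpa using hc
        have := pvCount_pySetCell_lt g i.toNat j.toNat h1
        omega
  | succ c ih =>
    intro g i j n m s f hle hf
    obtain ⟨f', rfl⟩ : ∃ f', f = f' + 1 := ⟨f - 1, by omega⟩
    rw [floodStack, encontrar_navioF]
    split
    · rfl
    · split
      · rfl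
      · rename_i hb hc
        have h1 : getCellN g i.toNat j.toNat = "#" := by simpa using hc
        have hset := pvCount_pySetCell_lt g i.toNat j.toNat h1
        set g1 := pySetCell g i.toNat j.toNat "." with hg1
        have hc1 : pvCount g1 ≤ c := by omega
        have hf1 : pvCount g1 < f' := by omega
        set g2 := encontrar_navioF f' g1 i (j+1) n m with hg2
        have hc2 : pvCount g2 ≤ c := le_trans (pvCount_encF_le _ _ _ _ _ _) hc1
        have hf2 : pvCount g2 < f' := lt_of_le_of_lt (pvCount_encF_le _ _ _ _ _ _) hf1
        set g3 := encontrar_navioF f' g2 i (j-1) n m with hg3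
        have hc3 : pvCount g3 ≤ c := le_trans (pvCount_encF_le _ _ _ _ _ _) hc2
        have hf3 : pvCount g3 < f' := lt_of_le_of_lt (pvCount_encF_le _ _ _ _ _ _) hf2
        set g4 := encontrar_navioF f' g3 (i+1) j n m with hg4
        have hc4 : pvCount g4 ≤ c := le_trans (pvCount_encF_le _ _ _ _ _ _) hc3
        have hf4 : pvCount g4 < f' := lt_of_le_of_lt (pvCount_encF_le _ _ _ _ _ _) hf3
        rw [ih g1 i (j+1) n m _ f' hc1 hf1]
        rw [ih g2 i (j-1) n m _ f' hc2 hf2]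
        rw [ih g3 (i+1) j n m _ f' hc3 hf3]
        rw [ih g4 (i-1) j n m s f' hc4 hf4]

theorem outer_eq (ds : List (Int × Int)) : ∀ (g : List (List String)) (k : Int) (n m : Int) (fuel : Nat),
    pvCount g < fuel →
    (ds.foldl (fun (st : List (List String) × Int) d =>
      if pyGet2 st.1 (d.1 - 1) (d.2 - 1) == "#" then
        (pySet2 (encontrar_navioF fuel st.1 (d.1 - 1) (d.2 - 1) n m) (d.1 - 1) (d.2 - 1) ".", st.2 + 1)
      else (pySet2 st.1 (d.1 - 1) (d.2 - 1) ".", st.2)) (g, k)).2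
    = destruir_loop g ds k n m := by
  induction ds with
  | nil => intro g k n m fuel h; simp [destruir_loop]
  | cons d rest ih =>
    intro g k n m fuel h
    obtain ⟨l, c⟩ := d
    rw [destruir_loop]
    simp only [List.foldl_cons]
    by_cases hcell : pyGet2 g (l - 1) (c - 1) == "#"
    · have hfs : floodStack g [(l - 1, c - 1)] n m = encontrar_navioF fuel g (l - 1) (c - 1) n m := by
        rw [flood_eq (pvCount g) g (l - 1) (c - 1) n m [] fuel le_rfl h, floodStack]
      have hnext : pvCount (pySet2 (encontrar_navioF fuel g (l - 1) (c - 1) n m) (l - 1) (c - 1) ".") < fuel :=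
        lt_of_le_of_lt (le_trans (pvCount_pySet2_le _ _ _) (pvCount_encF_le _ _ _ _ _ _)) h
      simp only [hcell, if_pos, hfs]
      exact ih _ _ _ _ _ hnext
    · have hnext : pvCount (pySet2 g (l - 1) (c - 1) ".") < fuel :=
        lt_of_le_of_lt (pvCount_pySet2_le _ _ _) h
      simp only [hcell, if_false, Bool.false_eq_true]
      exact ih _ _ _ _ _ hnext

theorem pvCount_le_of_rect (T : List (List String)) (m : Nat)
    (h : ∀ r ∈ T, r.length = m) : pvCount T ≤ T.length * m := by
  induction T with
  | nil => simp [pvCount]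
  | cons r t ih =>
    have hr : r.length = m := h r (by simp)
    have hcp : r.countP (fun s => s == "#") ≤ m := hr ▸ List.countP_le_length
    have := ih (fun r hr' => h r (by simp [hr']))
    simp [pvCount, Nat.succ_mul]
    omega

-- ===== VERDICT (by name: the statement is the Claim_ definition above) =====
theorem destruir_navios_spec : Claim_equal_destruir_navios := by
  intro T ds _hdom hpre
  obtain ⟨hne, hrect, _⟩ := hpre
  unfold Spec_destruir_navios destruir_navios destruir_navios_alt
  have hcnt : pvCount T < T.length * (T.headD []).length + 1 :=
    Nat.lt_succ_of_le (pvCount_le_of_rect T _ hrect)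
  exact outer_eq ds T 0 (T.length : Int) ((T.headD []).length : Int) _ hcnt
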